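-- pv_equiv track=rewrite | github.com/ANUBHAVNATANI/Data-Structures-And-Algorithms | Algorithms/Python/DP/Weighted-Interval.py | computePi
-- ===== SOURCE A (Python) =====
-- def computePi(val_st_F, ft_ar, st_ar):
--     Pi = [0]*len(ft_ar)
--     c = sorted(ft_ar)
--     for i in range(0, len(val_st_F)):
--         for j in range(0, i):
--             if(c[j] <= st_ar[i]):
--                 d = val_st_F[j]
--                 if(d > Pi[i]):
--                     Pi[i] = j
--     #Pi[0] = val_st_F[0]
--     return Pi
-- ===== SOURCE B (Python) =====
-- def computePi(val_st_F, ft_ar, st_ar):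
--     # O(n log n): the running scan over a qualifying prefix depends only on the
--     # prefix length, so tabulate its state once (best[m] = state after the
--     # first m entries) and find each prefix length by binary search on the
--     # sorted finish times.
--     n = len(val_st_F)
--     c = sorted(ft_ar)
--     best = [0]
--     for j in range(n):
--         best.append(j if val_st_F[j] > best[j] else best[j])
--     Pi = [0] * len(ft_ar)
--     for i in range(n):
--         s = st_ar[i]
--         lo, hi = 0, n
--         while lo < hi:
--             mid = (lo + hi) // 2
--             if c[mid] <= s:
--                 lo = mid + 1
--             else:
--                 hi = mid
--         Pi[i] = best[min(lo, i)]
--     return Pi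
-- ===== Notes on version B (the rewrite author's own statement) =====
-- stated objective: faster
-- what changed: Replaces A's per-index rescan of the qualifying prefix (nested loops) by a once-built table of the running scan's state plus a binary search on the sorted finish times per index; Pre_ excludes mismatched parallel-array lengths (val_st_F longer than ft_ar or st_ar), where A usually raises IndexError and only accidentally returns when no finish time qualifies.
-- outside the precondition, e.g. on computePi([1, 2], [5], [-10, -10]): A returns [0], B raises IndexError
import Mathlib
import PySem

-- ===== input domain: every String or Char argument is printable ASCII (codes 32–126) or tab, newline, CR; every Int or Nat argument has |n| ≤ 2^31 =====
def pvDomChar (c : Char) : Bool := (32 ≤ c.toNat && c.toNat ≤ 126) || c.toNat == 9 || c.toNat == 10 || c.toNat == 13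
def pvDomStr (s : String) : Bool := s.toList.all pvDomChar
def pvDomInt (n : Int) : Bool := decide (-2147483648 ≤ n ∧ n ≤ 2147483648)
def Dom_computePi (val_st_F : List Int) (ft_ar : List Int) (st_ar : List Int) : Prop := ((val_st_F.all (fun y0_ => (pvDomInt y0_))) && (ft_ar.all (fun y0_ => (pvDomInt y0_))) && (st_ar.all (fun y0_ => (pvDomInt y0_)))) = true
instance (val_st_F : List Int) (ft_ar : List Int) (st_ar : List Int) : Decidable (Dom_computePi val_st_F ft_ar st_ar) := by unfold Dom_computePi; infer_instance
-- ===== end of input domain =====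

-- B replaces A's O(n^2) nested prefix re-scan by a once-built table of the running
-- scan's state plus a binary search on the sorted finish times (objective: faster).

-- ===== PORT A =====
def computePi (val_st_F : List Int) (ft_ar : List Int) (st_ar : List Int) : List Int :=
  let Pi0 : List Int := List.replicate ft_ar.length 0
  let c := PySem.List.sorted ft_ar (fun x => x) false
  (PySem.List.pyRange 0 val_st_F.length 1).foldl (fun Pi i =>
    (PySem.List.pyRange 0 i 1).foldl (fun Pi j =>
      if PySem.List.pyGetD c j 0 ≤ PySem.List.pyGetD st_ar i 0 then
        let d := PySem.List.pyGetD val_st_F j 0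
        if d > PySem.List.pyGetD Pi i 0 then Pi.set i.toNat j else Pi
      else Pi) Pi) Pi0

-- ===== PORT B =====
-- hand-written binary search from Source B (python's 'while lo < hi' loop), step for step;
-- the fuel argument (hi - lo, which strictly decreases) only makes the loop total
def bsrGo (c : List Int) (s : Int) : Nat → Nat → Nat → Nat
  | 0, lo, _ => lo
  | fuel + 1, lo, hi =>
    if lo < hi then
      let mid := (lo + hi) / 2
      if PySem.List.pyGetD c (mid : Int) 0 ≤ s then bsrGo c s fuel (mid + 1) hi
      else bsrGo c s fuel lo mid
    else lo

def bsrLoop (c : List Int) (s : Int) (lo hi : Nat) : Nat :=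
  bsrGo c s (hi - lo) lo hi

def computePi_alt (val_st_F : List Int) (ft_ar : List Int) (st_ar : List Int) : List Int :=
  let n := val_st_F.length
  let c := PySem.List.sorted ft_ar (fun x => x) false
  let best := (PySem.List.pyRange 0 n 1).foldl (fun best j =>
      best ++ [if PySem.List.pyGetD val_st_F j 0 > PySem.List.pyGetD best j 0 then j
               else PySem.List.pyGetD best j 0]) [0]
  (PySem.List.pyRange 0 n 1).foldl (fun Pi i =>
      let s := PySem.List.pyGetD st_ar i 0
      let lo := bsrLoop c s 0 n
      Pi.set i.toNat (PySem.List.pyGetD best (min (lo : Int) i) 0))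
    (List.replicate ft_ar.length 0)

-- ===== PRECONDITION & SPEC =====
-- Pre_ excludes mismatched parallel-array lengths (val_st_F longer than ft_ar or
-- st_ar), where A usually raises IndexError and only accidentally returns when no
-- finish time qualifies.
def Pre_computePi (val_st_F : List Int) (ft_ar : List Int) (st_ar : List Int) : Prop :=
  val_st_F.length ≤ ft_ar.length ∧ val_st_F.length ≤ st_ar.length
instance (val_st_F : List Int) (ft_ar : List Int) (st_ar : List Int) : Decidable (Pre_computePi val_st_F ft_ar st_ar) := by unfold Pre_computePi; infer_instance
def pvWitness_computePi : List Int × List Int × List Int := ([4, 2, 7], [1, 3, 5, 6], [0, 2, 4])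

def Spec_computePi (val_st_F : List Int) (ft_ar : List Int) (st_ar : List Int) (out : List Int) : Prop := out = computePi_alt val_st_F ft_ar st_ar
instance (val_st_F : List Int) (ft_ar : List Int) (st_ar : List Int) (out : List Int) : Decidable (Spec_computePi val_st_F ft_ar st_ar out) := by unfold Spec_computePi; infer_instance

-- ===== CLAIM (what is proved, stated in full; the proofs are below) =====
def Claim_equal_computePi : Prop := ∀ (val_st_F : List Int) (ft_ar : List Int) (st_ar : List Int), Dom_computePi val_st_F ft_ar st_ar → Pre_computePi val_st_F ft_ar st_ar → Spec_computePi val_st_F ft_ar st_ar (computePi val_st_F ft_ar st_ar)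

-- ===== LEMMAS AND PROOFS =====

-- scalar versions of the two loop bodies and their prefix folds (proof-only helpers)
def stepA (c v : List Int) (s : Int) (p : Int) (j : Nat) : Int :=
  if c.getD j 0 ≤ s then (if v.getD j 0 > p then (j : Int) else p) else p

def stepF (v : List Int) (p : Int) (j : Nat) : Int :=
  if v.getD j 0 > p then (j : Int) else p

def Aval (c v : List Int) (s : Int) (i : Nat) : Int :=
  (List.range i).foldl (stepA c v s) 0

def Fval (v : List Int) (m : Nat) : Int :=
  (List.range m).foldl (stepF v) 0

theorem getD_mono_of_pairwise (c : List Int) (hc : List.Pairwise (· ≤ ·) c)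
    {t1 t2 : Nat} (h12 : t1 ≤ t2) (h2 : t2 < c.length) :
    c.getD t1 0 ≤ c.getD t2 0 := by
  rcases Nat.lt_or_ge t1 t2 with h | h
  · rw [List.getD_eq_getElem _ _ (lt_trans h h2), List.getD_eq_getElem _ _ h2]
    exact (List.pairwise_iff_getElem.mp hc) t1 t2 (lt_trans h h2) h2 h
  · have : t1 = t2 := le_antisymm h12 h
    rw [this]

theorem bsrGo_inv (c : List Int) (s : Int) (hc : List.Pairwise (· ≤ ·) c)
    (N : Nat) (hN : N ≤ c.length) :
    ∀ fuel lo hi, hi - lo ≤ fuel → lo ≤ hi → hi ≤ N →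
    (∀ t, t < lo → c.getD t 0 ≤ s) →
    (∀ t, hi ≤ t → t < N → s < c.getD t 0) →
    bsrGo c s fuel lo hi ≤ N ∧
    (∀ t, t < bsrGo c s fuel lo hi → c.getD t 0 ≤ s) ∧
    (∀ t, bsrGo c s fuel lo hi ≤ t → t < N → s < c.getD t 0) := by
  intro fuel
  induction fuel with
  | zero =>
    intro lo hi hfuel hlo hhi hbelow habove
    simp only [bsrGo]
    exact ⟨by omega, hbelow, fun t ht htc => habove t (by omega) htc⟩
  | succ fuel ih =>
    intro lo hi hfuel hlo hhi hbelow habove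
    simp only [bsrGo]
    by_cases h : lo < hi
    · rw [if_pos h]
      have hmid : (lo + hi) / 2 < c.length := by omega
      by_cases hle : PySem.List.pyGetD c (((lo + hi) / 2 : Nat) : Int) 0 ≤ s
      · rw [if_pos hle]
        have hle' : c.getD ((lo + hi) / 2) 0 ≤ s := by
          have := hle; rwa [PySem.List.pyGetD_natCast] at this
        refine ih ((lo + hi) / 2 + 1) hi (by omega) (by omega) hhi ?_ habove
        intro t ht
        exact le_trans (getD_mono_of_pairwise c hc (by omega) hmid) hle'
      · rw [if_neg hle]
        have hgt' : s < c.getD ((lo + hi) / 2) 0 := by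
          have := not_le.mp hle; rwa [PySem.List.pyGetD_natCast] at this
        refine ih lo ((lo + hi) / 2) (by omega) (by omega) (by omega) hbelow ?_
        intro t hmt htc
        exact lt_of_lt_of_le hgt' (getD_mono_of_pairwise c hc hmt (by omega))
    · rw [if_neg h]
      exact ⟨by omega, hbelow, fun t ht htc => habove t (by omega) htc⟩

theorem bsr_le_iff (c : List Int) (s : Int) (hc : List.Pairwise (· ≤ ·) c)
    (N : Nat) (hN : N ≤ c.length) :
    ∀ j, j < N → (c.getD j 0 ≤ s ↔ j < bsrLoop c s 0 N) := by
  obtain ⟨_, hb, ha⟩ := bsrGo_inv c s hc N hN (N - 0) 0 N le_rfl (Nat.zero_le _) le_rfl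
    (by omega) (by omega)
  intro j hj
  unfold bsrLoop
  constructor
  · intro hle
    by_contra hnot
    exact absurd hle (not_le.mpr (ha j (by omega) hj))
  · intro hlt
    exact hb j hlt

theorem foldl_fixed {α β : Type} (f : β → α → β) :
    ∀ (l : List α), (∀ x ∈ l, ∀ b, f b x = b) → ∀ b, l.foldl f b = b := by
  intro l
  induction l with
  | nil => intro _ b; rfl
  | cons x xs ih =>
    intro h b
    simp only [List.foldl_cons, h x (by simp)]
    exact ih (fun y hy => h y (by simp [hy])) b

theorem bridge (c v : List Int) (s : Int) (i k : Nat)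
    (hk : ∀ j, j < i → (c.getD j 0 ≤ s ↔ j < k)) :
    (List.range i).foldl (stepA c v s) 0 = Fval v (min i k) := by
  by_cases h : i ≤ k
  · rw [Nat.min_eq_left h]
    exact PySem.List.foldl_congr_mem _ _ _ _ (by
      intro p j hj
      have hji : j < i := by simpa using hj
      simp only [stepA, stepF]
      rw [if_pos ((hk j hji).mpr (by omega))])
  · have h' : k < i := Nat.lt_of_not_le h
    rw [Nat.min_eq_right (Nat.le_of_lt h')]
    have hsplit : i = k + (i - k) := by omega
    rw [hsplit, List.range_add, List.foldl_append]
    have h1 : (List.range k).foldl (stepA c v s) 0 = Fval v k := by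
      exact PySem.List.foldl_congr_mem _ _ _ _ (by
        intro p j hj
        have hjk : j < k := by simpa using hj
        simp only [stepA, stepF]
        rw [if_pos ((hk j (by omega)).mpr hjk)])
    rw [h1]
    exact foldl_fixed _ _ (by
      intro x hx b
      simp only [List.mem_map, List.mem_range] at hx
      obtain ⟨y, hy, rfl⟩ := hx
      have : ¬ c.getD (k + y) 0 ≤ s := fun hle =>
        absurd ((hk (k + y) (by omega)).mp hle) (by omega)
      simp only [stepA]
      rw [if_neg this]) _

-- A's inner loop on the array equals a scalar fold on entry i
theorem innerA (c v : List Int) (s : Int) :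
    ∀ (js : List Nat) (L : List Int) (i : Nat), i < L.length →
    js.foldl (fun Pi j => if c.getD j 0 ≤ s then
        (if v.getD j 0 > Pi.getD i 0 then Pi.set i (j : Int) else Pi) else Pi) L
      = L.set i (js.foldl (stepA c v s) (L.getD i 0)) := by
  intro js
  induction js with
  | nil =>
    intro L i hi
    simp only [List.foldl_nil]
    rw [List.getD_eq_getElem _ _ hi, List.set_getElem_self]
  | cons j js ih =>
    intro L i hi
    simp only [List.foldl_cons]
    by_cases hcj : c.getD j 0 ≤ s
    · by_cases hv : v.getD j 0 > L.getD i 0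
      · rw [if_pos hcj, if_pos hv, ih _ i (by simpa using hi), List.set_set]
        congr 1
        have hset : (L.set i (j : Int)).getD i 0 = (j : Int) := by
          rw [List.getD_eq_getElem _ _ (by simpa using hi)]
          exact List.getElem_set_self _
        rw [hset]
        simp only [stepA]
        rw [if_pos hcj, if_pos hv]
      · rw [if_pos hcj, if_neg hv, ih _ i hi]
        congr 2
        simp only [stepA]
        rw [if_pos hcj, if_neg hv]
    · rw [if_neg hcj, ih _ i hi]
      congr 2
      simp only [stepA]
      rw [if_neg hcj]

-- the characterization of A's result
theorem computePi_char (v ft st : List Int) (h1 : v.length ≤ ft.length) :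
    computePi v ft st =
      (List.range ft.length).map (fun i =>
        if i < v.length then
          Aval (PySem.List.sorted ft (fun x => x) false) v (st.getD i 0) i
        else 0) := by
  unfold computePi
  set c := PySem.List.sorted ft (fun x => x) false with hcdef
  simp only [PySem.List.pyRange_zero_natCast, List.foldl_map]
  have key : ∀ m, m ≤ v.length →
      (List.range m).foldl (fun Pi (i : Nat) =>
        (List.range i).foldl (fun Pi (j : Nat) =>
          if PySem.List.pyGetD c (j : Int) 0 ≤ PySem.List.pyGetD st (i : Int) 0 then
            if PySem.List.pyGetD v (j : Int) 0 > PySem.List.pyGetD Pi (i : Int) 0 then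
              Pi.set (i : Int).toNat (j : Int) else Pi
          else Pi) Pi) (List.replicate ft.length 0) =
      (List.range ft.length).map (fun i =>
        if i < m then Aval c v (st.getD i 0) i else 0) := by
    intro m
    induction m with
    | zero =>
      intro _
      simp [List.map_const']
    | succ m ih =>
      intro hm
      rw [List.range_succ, List.foldl_append, ih (by omega)]
      simp only [List.foldl_cons, List.foldl_nil]
      have hmlen : m < ft.length := by omega
      have hLlen : m < ((List.range ft.length).map (fun i =>
          if i < m then Aval c v (st.getD i 0) i else 0)).length := by
        simpa using hmlen
      have hconv : ∀ (L : List Int),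
          (List.range m).foldl (fun Pi (j : Nat) =>
            if PySem.List.pyGetD c (j : Int) 0 ≤ PySem.List.pyGetD st (m : Int) 0 then
              if PySem.List.pyGetD v (j : Int) 0 > PySem.List.pyGetD Pi (m : Int) 0 then
                Pi.set (m : Int).toNat (j : Int) else Pi
            else Pi) L =
          (List.range m).foldl (fun Pi (j : Nat) =>
            if c.getD j 0 ≤ st.getD m 0 then
              if v.getD j 0 > Pi.getD m 0 then Pi.set m (j : Int) else Pi
            else Pi) L := by
        intro L
        apply PySem.List.foldl_congr_mem
        intro acc x _
        simp [PySem.List.pyGetD_natCast]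
      rw [hconv, innerA c v (st.getD m 0) (List.range m) _ m hLlen]
      rw [List.getD_eq_getElem _ _ hLlen]
      simp only [List.getElem_map, List.getElem_range]
      rw [if_neg (by omega)]
      apply List.ext_getElem
      · simp
      · intro idx hidx1 hidx2
        simp only [List.length_set, List.length_map, List.length_range] at hidx1
        rw [List.getElem_set]
        simp only [List.getElem_map, List.getElem_range]
        rcases Nat.lt_trichotomy idx m with h | h | h
        · rw [if_neg (by omega), if_pos h, if_pos (by omega)]
        · subst h
          rw [if_pos rfl, if_pos (by omega)]
          rfl
        · rw [if_neg (by omega), if_neg (by omega), if_neg (by omega)]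
  exact key v.length le_rfl

-- the characterization of B's prefix table
theorem bestTable_char (v : List Int) :
    ∀ m, (List.range m).foldl (fun best (j : Nat) =>
        best ++ [if PySem.List.pyGetD v (j : Int) 0 > PySem.List.pyGetD best (j : Int) 0 then (j : Int)
              else PySem.List.pyGetD best (j : Int) 0]) [0] =
      (List.range (m + 1)).map (Fval v) := by
  intro m
  induction m with
  | zero => simp [Fval]
  | succ m ih =>
    rw [List.range_succ, List.foldl_append, ih]
    simp only [List.foldl_cons, List.foldl_nil]
    have hF : PySem.List.pyGetD ((List.range (m + 1)).map (Fval v)) (m : Int) 0 = Fval v m := by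
      rw [PySem.List.pyGetD_natCast, PySem.List.getD_map_range _ _ _ _ (by omega)]
    rw [hF, PySem.List.pyGetD_natCast]
    have hFm1 : (if v.getD m 0 > Fval v m then (m : Int) else Fval v m) = Fval v (m + 1) := by
      simp [Fval, List.range_succ, stepF]
    rw [hFm1, List.range_succ (n := m + 1), List.map_append]
    simp

-- the characterization of B's result
theorem computePi_alt_char (v ft st : List Int) :
    computePi_alt v ft st =
      (List.range ft.length).map (fun i =>
        if i < v.length then
          Fval v (min i (bsrLoop (PySem.List.sorted ft (fun x => x) false)
            (st.getD i 0) 0 v.length))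
        else 0) := by
  unfold computePi_alt
  set c := PySem.List.sorted ft (fun x => x) false with hcdef
  simp only [PySem.List.pyRange_zero_natCast, List.foldl_map]
  rw [bestTable_char v v.length]
  have key : ∀ m, m ≤ v.length →
      (List.range m).foldl (fun Pi (i : Nat) =>
        Pi.set (i : Int).toNat
          (PySem.List.pyGetD ((List.range (v.length + 1)).map (Fval v))
            (min ((bsrLoop c (PySem.List.pyGetD st (i : Int) 0) 0 v.length : Nat) : Int)
              (i : Int)) 0))
        (List.replicate ft.length 0) =
      (List.range ft.length).map (fun i =>
        if i < m then Fval v (min i (bsrLoop c (st.getD i 0) 0 v.length)) else 0) := by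
    intro m
    induction m with
    | zero =>
      intro _
      simp [List.map_const']
    | succ m ih =>
      intro hm
      rw [List.range_succ (n := m), List.foldl_append, ih (by omega)]
      simp only [List.foldl_cons, List.foldl_nil, PySem.List.pyGetD_natCast,
        Int.toNat_natCast]
      set lo := bsrLoop c (st.getD m 0) 0 v.length with hlo
      rw [← Nat.cast_min, PySem.List.pyGetD_natCast,
        PySem.List.getD_map_range _ _ _ _ (by omega), Nat.min_comm]
      apply List.ext_getElem
      · simp
      · intro idx hidx1 hidx2
        simp only [List.length_set, List.length_map, List.length_range] at hidx1
        rw [List.getElem_set]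
        simp only [List.getElem_map, List.getElem_range]
        rcases Nat.lt_trichotomy idx m with h | h | h
        · rw [if_neg (by omega), if_pos h, if_pos (by omega)]
        · subst h
          rw [if_pos rfl, if_pos (by omega)]
        · rw [if_neg (by omega), if_neg (by omega), if_neg (by omega)]
  exact key v.length le_rfl

-- ===== VERDICT (by name: the statement is the Claim_ definition above) =====
theorem computePi_spec : Claim_equal_computePi := by
  intro v ft st _hdom hpre
  obtain ⟨h1, _h2⟩ := hpre
  unfold Spec_computePi
  rw [computePi_char v ft st h1, computePi_alt_char v ft st]
  apply List.map_congr_left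
  intro i hi
  by_cases hin : i < v.length
  · rw [if_pos hin, if_pos hin]
    set c := PySem.List.sorted ft (fun x => x) false with hcdef
    have hc : List.Pairwise (· ≤ ·) c := by
      simpa using PySem.List.sorted_pairwise ft (fun x => x)
    have hcl : c.length = ft.length := PySem.List.length_sorted ft _ _
    exact bridge c v (st.getD i 0) i _ (fun j hj =>
      bsr_le_iff c (st.getD i 0) hc v.length (by omega) j (by omega))
  · rw [if_neg hin, if_neg hin]
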